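-- pv_equiv track=rewrite | github.com/CardiAP/CardiAp | lib/analysis/.ipynb_checkpoints/peaks_calculation-checkpoint.py | _min_peaks_positions
-- ===== SOURCE A (Python) =====
-- def _min_peaks_positions(intensities, max_peaks):
--     minimums = []
--     last_max = 0
--     for max_index in max_peaks:
--         minimums.append(minimo_bl(intensities[last_max:max_index]) + last_max)
--         last_max = max_index
--
--     minimums.append(minimo_bl(intensities[last_max:len(intensities)]) + last_max)
--
--
--     return minimums
--
-- def minimo_bl (vector):
--     b = -min((x, -i) for i, x in enumerate(vector))[1]
--     return b
-- ===== SOURCE B (Python) =====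
-- def _min_peaks_positions(intensities, max_peaks):
--     # Sort all indices once by (value, -index); walking that order, the first
--     # index that lands in a segment is that segment's minimum position (ties
--     # resolved to the rightmost occurrence by the -index key).
--     order = sorted(range(len(intensities)), key=lambda i: (intensities[i], -i))
--     best = {}
--     for i in order:
--         segment = sum(1 for b in max_peaks if b <= i)
--         best.setdefault(segment, i)
--     return [best[k] for k in range(len(max_peaks) + 1)]
-- ===== Notes on version B (the rewrite author's own statement) =====
-- stated objective: alternative
-- what changed: Replaces the per-segment slice-and-min decomposition (minimo_bl over (value,-index) tuples on each slice plus offsets) by one global sort of all indices keyed by (value,-index) and a single first-hit dict pass over segment ids; Pre_ excludes boundary lists that leave some segment empty (A raises ValueError there) or contain negative/out-of-order boundaries, where A's slice-clamped positions are accidental.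
-- outside the precondition, e.g. on _min_peaks_positions([5, 3, 7], [-1]): A returns [1, -1], B raises KeyError
import Mathlib
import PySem

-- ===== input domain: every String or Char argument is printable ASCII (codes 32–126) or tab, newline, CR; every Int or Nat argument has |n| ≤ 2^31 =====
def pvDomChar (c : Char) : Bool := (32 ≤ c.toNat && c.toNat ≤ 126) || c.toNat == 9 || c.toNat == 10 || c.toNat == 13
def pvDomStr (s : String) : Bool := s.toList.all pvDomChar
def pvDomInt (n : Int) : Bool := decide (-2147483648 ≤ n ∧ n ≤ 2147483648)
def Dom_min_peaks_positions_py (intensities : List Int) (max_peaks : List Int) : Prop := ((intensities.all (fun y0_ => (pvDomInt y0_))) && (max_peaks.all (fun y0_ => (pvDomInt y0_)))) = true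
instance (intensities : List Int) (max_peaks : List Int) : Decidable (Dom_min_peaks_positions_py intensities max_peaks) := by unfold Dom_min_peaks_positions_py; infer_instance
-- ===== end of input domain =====

-- B replaces A's per-segment slice-and-min decomposition by one global sort of all indices
-- by (value, -index) plus a first-hit dict keyed by segment id (objective: alternative).

-- ===== PORT A =====
-- minimo_bl: Python's min over the generator (x, -i), hand-ported as a fold with the
-- exact lexicographic tuple comparison (new pair taken only when strictly smaller,
-- matching min's first-extremal rule). Empty vector: Python raises ValueError
-- (excluded by Pre_); the port returns 0 there.
def minimo_bl_py (vector : List Int) : Int :=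
  match vector.zipIdx.map (fun p => (p.1, -(p.2 : Int))) with
  | [] => 0
  | h :: t =>
      -(t.foldl (fun m p => if p.1 < m.1 ∨ (p.1 = m.1 ∧ p.2 < m.2) then p else m) h).2

def min_peaks_positions_py (intensities : List Int) (max_peaks : List Int) : List Int :=
  let st := max_peaks.foldl
    (fun (st : List Int × Int) max_index =>
      (st.1 ++ [minimo_bl_py (PySem.List.slice intensities (some st.2) (some max_index)) + st.2],
       max_index))
    ([], 0)
  st.1 ++ [minimo_bl_py (PySem.List.slice intensities (some st.2) (some (intensities.length : Int))) + st.2]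

-- ===== PORT B =====
-- Source B's 'sum(1 for b in max_peaks if b <= i)': the segment id of index i
def pvSegId (max_peaks : List Int) (i : Int) : Int :=
  (max_peaks.map (fun b => if b ≤ i then (1 : Int) else 0)).sum

-- Source B: sort all indices once by the tuple key (intensities[i], -i) (indices produced by
-- range are in range, so pyGetD's default is never read), then walk that order filling a
-- dict keyed by segment id with setdefault, and read the dict back for k = 0..len(max_peaks).
-- Python's best[k] raises KeyError on an empty segment (excluded by Pre_); the port reads 0 there.
def min_peaks_positions_py_alt (intensities : List Int) (max_peaks : List Int) : List Int :=
  let order := PySem.List.sorted2 (PySem.List.pyRange 0 (intensities.length : Int) 1)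
      (fun i => PySem.List.pyGetD intensities i 0) (fun i => -i)
  let best := order.foldl (fun d i => d.setdefault (pvSegId max_peaks i) i)
      (PySem.Dict.empty : PySem.Dict Int Int)
  (PySem.List.pyRange 0 ((max_peaks.length : Int) + 1) 1).map (fun k => best.getD k 0)

-- ===== PRECONDITION & SPEC =====
-- Pre_ excludes boundary lists that are not strictly increasing strictly between 0 and
-- len(intensities) (and the empty intensities list): there some segment is empty, so A
-- raises ValueError — except when a negative boundary makes Python's slice clamping and
-- negative offsets still return (meaningless) positions, where B raises KeyError.
def Pre_min_peaks_positions_py (intensities : List Int) (max_peaks : List Int) : Prop :=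
  intensities ≠ [] ∧ List.Pairwise (· < ·) ((0 : Int) :: max_peaks) ∧
    ∀ p ∈ max_peaks, p < (intensities.length : Int)
instance (intensities : List Int) (max_peaks : List Int) : Decidable (Pre_min_peaks_positions_py intensities max_peaks) := by unfold Pre_min_peaks_positions_py; infer_instance

def pvWitness_min_peaks_positions_py : List Int × List Int := ([1, 0, 2, 0, 5], [2, 4])

def Spec_min_peaks_positions_py (intensities : List Int) (max_peaks : List Int) (out : List Int) : Prop := out = min_peaks_positions_py_alt intensities max_peaks
instance (intensities : List Int) (max_peaks : List Int) (out : List Int) : Decidable (Spec_min_peaks_positions_py intensities max_peaks out) := by unfold Spec_min_peaks_positions_py; infer_instance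

-- ===== CLAIM (what is proved, stated in full; the proofs are below) =====
def Claim_equal_min_peaks_positions_py : Prop := ∀ (intensities : List Int) (max_peaks : List Int), Dom_min_peaks_positions_py intensities max_peaks → Pre_min_peaks_positions_py intensities max_peaks → Spec_min_peaks_positions_py intensities max_peaks (min_peaks_positions_py intensities max_peaks)

-- ===== LEMMAS AND PROOFS =====

-- the lexicographic "index r is at least as good as index j" order on (value, -index)
def pvKle (v : Int → Int) (r j : Int) : Prop := v r < v j ∨ (v r = v j ∧ j ≤ r)

-- r is the (unique) last position of the minimum value on [s, e)
def pvArg (intensities : List Int) (s e r : Int) : Prop :=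
  s ≤ r ∧ r < e ∧ ∀ j, s ≤ j → j < e →
    pvKle (fun i => PySem.List.pyGetD intensities i 0) r j

lemma pvArg_unique (intensities : List Int) (s e r1 r2 : Int)
    (h1 : pvArg intensities s e r1) (h2 : pvArg intensities s e r2) : r1 = r2 := by
  obtain ⟨hs1, he1, hm1⟩ := h1
  obtain ⟨hs2, he2, hm2⟩ := h2
  have a12 := hm1 r2 hs2 he2
  have a21 := hm2 r1 hs1 he1
  unfold pvKle at a12 a21
  omega

-- A's tuple-min fold returns a member of the list that no member lexicographically beats
lemma pvFoldMin (t : List (Int × Int)) : ∀ h : Int × Int,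
    (t.foldl (fun m p => if p.1 < m.1 ∨ (p.1 = m.1 ∧ p.2 < m.2) then p else m) h) ∈ h :: t ∧
    ∀ p ∈ h :: t,
      ¬ (p.1 < (t.foldl (fun m p => if p.1 < m.1 ∨ (p.1 = m.1 ∧ p.2 < m.2) then p else m) h).1 ∨
         (p.1 = (t.foldl (fun m p => if p.1 < m.1 ∨ (p.1 = m.1 ∧ p.2 < m.2) then p else m) h).1 ∧
          p.2 < (t.foldl (fun m p => if p.1 < m.1 ∨ (p.1 = m.1 ∧ p.2 < m.2) then p else m) h).2)) := by
  induction t with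
  | nil =>
      intro h
      refine ⟨by simp, ?_⟩
      intro p hp
      simp at hp
      subst hp
      simp
  | cons x t ih =>
      intro h
      simp only [List.foldl_cons]
      obtain ⟨hmem, hmin⟩ := ih (if x.1 < h.1 ∨ (x.1 = h.1 ∧ x.2 < h.2) then x else h)
      set r := t.foldl (fun m p => if p.1 < m.1 ∨ (p.1 = m.1 ∧ p.2 < m.2) then p else m)
        (if x.1 < h.1 ∨ (x.1 = h.1 ∧ x.2 < h.2) then x else h) with hr
      constructor
      · rcases List.mem_cons.mp hmem with hm | hm
        · by_cases hc : x.1 < h.1 ∨ (x.1 = h.1 ∧ x.2 < h.2)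
          · rw [if_pos hc] at hm; exact hm ▸ (by simp)
          · rw [if_neg hc] at hm; exact hm ▸ (by simp)
        · simp [hm]
      · intro p hp
        have hlt : ∀ q, q ∈ (if x.1 < h.1 ∨ (x.1 = h.1 ∧ x.2 < h.2) then x else h) :: t →
            ¬ (q.1 < r.1 ∨ (q.1 = r.1 ∧ q.2 < r.2)) := hmin
        by_cases hc : x.1 < h.1 ∨ (x.1 = h.1 ∧ x.2 < h.2)
        · rcases List.mem_cons.mp hp with hph | hp'
          · -- p = h ; x beats h and x is not beaten by r
            have hx := hlt x (by rw [if_pos hc]; simp)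
            subst hph
            rcases hc with hc | hc <;> omega
          · rcases List.mem_cons.mp hp' with hpx | hpt
            · exact hpx ▸ hlt x (by rw [if_pos hc]; simp)
            · exact hlt p (by simp [hpt])
        · rcases List.mem_cons.mp hp with hph | hp'
          · exact hph ▸ hlt h (by rw [if_neg hc]; simp)
          · rcases List.mem_cons.mp hp' with hpx | hpt
            · -- p = x ; h not beaten by r and x does not beat h
              have hh := hlt h (by rw [if_neg hc]; simp)
              subst hpx
              have hc' : ¬ p.1 < h.1 ∧ (p.1 = h.1 → ¬ p.2 < h.2) :=
                ⟨fun h1 => hc (Or.inl h1), fun h1 h2 => hc (Or.inr ⟨h1, h2⟩)⟩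
              rcases lt_trichotomy p.1 h.1 with h1 | h1 | h1 <;> omega
            · exact hlt p (by simp [hpt])

-- per-segment characterisation of A: the slice minimum plus its offset is the argmin
lemma pvASeg (intensities : List Int) (s e : Int) (hs : 0 ≤ s) (hse : s < e)
    (he : e ≤ (intensities.length : Int)) :
    pvArg intensities s e
      (minimo_bl_py (PySem.List.slice intensities (some s) (some e)) + s) := by
  set n := intensities.length with hn
  set v := PySem.List.slice intensities (some s) (some e) with hv
  have hvdef : v = (intensities.drop s.toNat).take (e.toNat - s.toNat) := by
    rw [hv, PySem.List.slice_toNat intensities hs (by omega : (0:Int) ≤ e)]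
  have hlen : v.length = (e - s).toNat := by
    rw [hvdef]; simp [List.length_take, List.length_drop]; omega
  have hget : ∀ (j : Nat) (hj : j < v.length),
      v[j] = PySem.List.pyGetD intensities (s + (j : Int)) 0 := by
    intro j hj
    have hjn : s.toNat + j < n := by omega
    have h1 : v[j] = intensities[s.toNat + j]'(by omega) := by
      simp [hvdef, List.getElem_take, List.getElem_drop, Nat.add_comm]
    rw [h1, PySem.List.pyGetD_eq_getElem intensities 0 (by omega) (by omega)]
    congr 1
    omega
  obtain ⟨v0, vr, hv0⟩ : ∃ v0 vr, v = v0 :: vr := by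
    cases hvv : v with
    | nil => exfalso; rw [hvv] at hlen; simp at hlen; omega
    | cons a b => exact ⟨a, b, rfl⟩
  -- the pair list
  set P := v.zipIdx.map (fun p => (p.1, -(p.2 : Int))) with hP
  have hPlen : P.length = v.length := by simp [hP]
  have hPget : ∀ (j : Nat) (hj : j < P.length),
      P[j] = (v[j]'(by omega), -(j : Int)) := by
    intro j hj
    simp [hP, List.getElem_zipIdx]
  obtain ⟨h0, t0, hPsplit⟩ : ∃ h0 t0, P = h0 :: t0 := by
    cases hPP : P with
    | nil => exfalso; rw [hPP, hv0] at hPlen; simp at hPlen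
    | cons a b => exact ⟨a, b, rfl⟩
  obtain ⟨hmem, hmin⟩ := pvFoldMin t0 h0
  set r' := t0.foldl (fun m p => if p.1 < m.1 ∨ (p.1 = m.1 ∧ p.2 < m.2) then p else m) h0 with hr'
  have hminP : minimo_bl_py v = -r'.2 := by
    unfold minimo_bl_py
    rw [← hP, hPsplit]
  have hmemP : r' ∈ P := by rw [hPsplit]; exact hmem
  obtain ⟨j₀, hj₀, hj₀eq⟩ := List.mem_iff_getElem.mp hmemP
  have hr'eq : r' = (v[j₀]'(by omega), -(j₀ : Int)) := by rw [← hj₀eq, hPget j₀ hj₀]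
  have hres : minimo_bl_py v + s = s + (j₀ : Int) := by
    rw [hminP, hr'eq]; ring
  rw [hres]
  refine ⟨by omega, by omega, ?_⟩
  intro j hjs hje
  have hjl : (j - s).toNat < P.length := by omega
  have hPj := hPget _ hjl
  have hjmin := hmin (P[(j - s).toNat]) (by rw [← hPsplit]; exact List.getElem_mem hjl)
  rw [hPj, hr'eq] at hjmin
  have hgj : v[(j - s).toNat]'(by omega) = PySem.List.pyGetD intensities j 0 := by
    rw [hget _ (by omega)]
    congr 1
    omega
  have hg0 : v[j₀]'(by omega) = PySem.List.pyGetD intensities (s + (j₀ : Int)) 0 :=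
    hget _ (by omega)
  unfold pvKle
  simp only at hjmin ⊢
  rw [hgj, hg0] at hjmin
  rcases lt_trichotomy (PySem.List.pyGetD intensities j 0)
      (PySem.List.pyGetD intensities (s + (j₀ : Int)) 0) with h1 | h1 | h1
  · exact absurd (Or.inl h1) hjmin
  · right
    refine ⟨h1.symm, ?_⟩
    have h2 : ¬ (-(((j - s).toNat : Nat) : Int) < -(j₀ : Int)) :=
      fun hh => hjmin (Or.inr ⟨h1, hh⟩)
    omega
  · left; exact h1

-- A's loop produces the per-consecutive-boundary-pair list
lemma pvAList (intensities : List Int) : ∀ (bs : List Int) (acc : List Int) (s : Int),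
    (bs.foldl
      (fun (st : List Int × Int) max_index =>
        (st.1 ++ [minimo_bl_py (PySem.List.slice intensities (some st.2) (some max_index)) + st.2],
         max_index)) (acc, s)).1
    = acc ++ ((s :: bs).zip bs).map
        (fun p => minimo_bl_py (PySem.List.slice intensities (some p.1) (some p.2)) + p.1) := by
  intro bs
  induction bs with
  | nil => intro acc s; simp
  | cons e r ih =>
      intro acc s
      simp only [List.foldl_cons, List.zip_cons_cons, List.map_cons]
      rw [ih]
      simp

-- boolean comparator of sorted2 agrees with the single linear key K i = v i * (N+1) - i
lemma pvKeyLt (x y a b N : Int) (ha0 : 0 ≤ a) (haN : a < N) (hb0 : 0 ≤ b) (hbN : b < N) :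
    x * (N + 1) - a < y * (N + 1) - b ↔ (x < y ∨ (x = y ∧ b < a)) := by
  rcases lt_trichotomy x y with h | h | h
  · have h1 : (1 : Int) ≤ y - x := by omega
    have := mul_le_mul_of_nonneg_right h1 (by omega : (0:Int) ≤ N + 1)
    constructor
    · intro _; exact Or.inl h
    · intro _; nlinarith
  · subst h; constructor
    · intro hlt; right; exact ⟨rfl, by omega⟩
    · rintro (h | ⟨_, h⟩); · omega
      · omega
  · have h1 : (1 : Int) ≤ x - y := by omega
    have := mul_le_mul_of_nonneg_right h1 (by omega : (0:Int) ≤ N + 1)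
    constructor
    · intro hlt; nlinarith
    · rintro (h2 | ⟨h2, _⟩) <;> omega

lemma pvInsertByCongr (f g : Int → Int → Bool) (p : Int → Prop)
    (hfg : ∀ a b, p a → p b → f a b = g a b) :
    ∀ (x : Int) (ys : List Int), p x → (∀ y ∈ ys, p y) →
      PySem.List.insertBy f x ys = PySem.List.insertBy g x ys := by
  intro x ys
  induction ys with
  | nil => intro _ _; rfl
  | cons y ys ih =>
      intro hx hys
      simp only [PySem.List.insertBy]
      rw [hfg x y hx (hys y (by simp))]
      by_cases hc : g x y = true
      · simp [hc]
      · simp [hc, ih hx (fun z hz => hys z (by simp [hz]))]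

lemma pvFoldlInsertByCongr (f g : Int → Int → Bool) (p : Int → Prop)
    (hfg : ∀ a b, p a → p b → f a b = g a b) :
    ∀ (xs acc : List Int), (∀ x ∈ xs, p x) → (∀ x ∈ acc, p x) →
      xs.foldl (fun acc x => PySem.List.insertBy f x acc) acc
        = xs.foldl (fun acc x => PySem.List.insertBy g x acc) acc := by
  intro xs
  induction xs with
  | nil => intro acc _ _; rfl
  | cons x xs ih =>
      intro acc hxs hacc
      simp only [List.foldl_cons]
      rw [pvInsertByCongr f g p hfg x acc (hxs x (by simp)) hacc]
      exact ih _ (fun z hz => hxs z (by simp [hz]))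
        (fun z hz => (PySem.List.mem_insertBy g x z acc).mp hz |>.elim
          (fun h => h ▸ hxs x (by simp)) (fun h => hacc z h))

-- the first-hit dict loop reads back as find? over the traversal order
lemma pvDictFold (segF : Int → Int) :
    ∀ (l : List Int) (d : PySem.Dict Int Int) (k : Int),
      (l.foldl (fun d i => d.setdefault (segF i) i) d).get? k
        = (d.get? k).or (l.find? (fun i => segF i == k)) := by
  intro l
  induction l with
  | nil => intro d k; simp
  | cons i t ih =>
      intro d k
      simp only [List.foldl_cons, List.find?_cons]
      by_cases hk : segF i = k
      · rw [ih]
        simp only [hk, beq_self_eq_true]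
        have hset : (d.setdefault k i).get? k = some ((d.get? k).getD i) :=
          PySem.Dict.get?_setdefault_self d k i
        rw [hk] at *
        rw [hset]
        cases d.get? k <;> simp [Option.or]
      · rw [ih]
        have hne : (segF i == k) = false := by simp [hk]
        rw [hne, PySem.Dict.get?_setdefault_of_ne d i (by omega : k ≠ segF i)]

-- count of boundaries ≤ i on a strictly increasing list, when i lies in segment k
lemma pvCnt : ∀ (L : List Int), L.Pairwise (· < ·) →
    ∀ (k : Nat) (hk : k + 1 < L.length) (i : Int),
      L[k] ≤ i → i < L[k + 1] →
      L.countP (fun b => decide (b ≤ i)) = k + 1 := by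
  intro L
  induction L with
  | nil => intro _ k hk; simp at hk
  | cons b t ih =>
      intro hpw k hk i hlo hhi
      have hpw' := List.pairwise_cons.mp hpw
      match k with
      | 0 =>
          simp only [List.getElem_cons_zero] at hlo
          simp only [List.getElem_cons_succ] at hhi
          rw [List.countP_cons]
          have ht0 : ∀ a ∈ t, ¬ (a ≤ i) := by
            intro a ha
            match t, ha with
            | t0 :: tt, ha =>
              simp only [List.getElem_cons_zero] at hhi
              rcases List.mem_cons.mp ha with h | h
              · omega
              · have := (List.pairwise_cons.mp hpw'.2).1 a h
                omega
          have : t.countP (fun b => decide (b ≤ i)) = 0 :=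
            List.countP_eq_zero.mpr (by intro a ha; simpa using ht0 a ha)
          simp [this, hlo]
      | k' + 1 =>
          simp only [List.getElem_cons_succ] at hlo hhi
          have hb : b ≤ i := by
            have := hpw'.1 (t[k']'(by simp at hk; omega)) (List.getElem_mem _)
            omega
          rw [List.countP_cons]
          have := ih hpw'.2 k' (by simp at hk; omega) i hlo hhi
          simp [this, hb]

-- every point between the first and last boundary lies in some segment
lemma pvExistsSeg : ∀ (t : List Int) (a i : Int), a ≤ i →
    i < (a :: t).getLast (List.cons_ne_nil a t) →
    ∃ k, ∃ hk : k + 1 < (a :: t).length,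
      (a :: t)[k]'(Nat.lt_of_succ_lt hk) ≤ i ∧ i < (a :: t)[k + 1]'hk := by
  intro t
  induction t with
  | nil =>
      intro a i h1 h2
      simp at h2
      omega
  | cons b t ih =>
      intro a i h1 h2
      have h2' : i < (b :: t).getLast (List.cons_ne_nil b t) := by
        rw [List.getLast_cons (List.cons_ne_nil b t)] at h2
        exact h2
      by_cases hib : i < b
      · exact ⟨0, by simp, by simpa using h1, by simpa using hib⟩
      · obtain ⟨k, hk, hk1, hk2⟩ := ih b i (by omega) h2'
        exact ⟨k + 1, by simpa using Nat.succ_lt_succ hk, by simpa using hk1,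
          by simpa using hk2⟩

-- the sorted2 call of the B port is sorted under the injective linear key K i = v i * (N+1) - i
lemma pvOrderEq (intensities : List Int) :
    PySem.List.sorted2 (PySem.List.pyRange 0 (intensities.length : Int) 1)
        (fun i => PySem.List.pyGetD intensities i 0) (fun i => -i)
      = PySem.List.sorted (PySem.List.pyRange 0 (intensities.length : Int) 1)
        (fun i => PySem.List.pyGetD intensities i 0 * ((intensities.length : Int) + 1) - i) := by
  set N := (intensities.length : Int) with hN
  set v := fun i => PySem.List.pyGetD intensities i 0 with hv
  set K := fun i => v i * (N + 1) - i with hK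
  have hstart : PySem.List.sorted2 (PySem.List.pyRange 0 N 1) v (fun i => -i)
      = (PySem.List.pyRange 0 N 1).foldl
          (fun acc x => PySem.List.insertBy
            (fun a b => decide (v a < v b) || (!decide (v b < v a) && decide (-a < -b))) x acc)
          [] := rfl
  rw [hstart, PySem.List.sorted_eq_foldl_insertBy]
  apply pvFoldlInsertByCongr _ _ (fun i => 0 ≤ i ∧ i < N)
  · intro a b ha hb
    have hab := pvKeyLt (v a) (v b) a b N ha.1 ha.2 hb.1 hb.2
    rw [Bool.eq_iff_iff]
    simp only [Bool.or_eq_true, Bool.and_eq_true, Bool.not_eq_true',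
      decide_eq_true_eq, decide_eq_false_iff_not, hK]
    rw [hab]
    omega
  · intro x hx
    exact (PySem.List.mem_pyRange_one.mp hx)
  · intro x hx
    simp at hx

-- ===== VERDICT (by name: the statement is the Claim_ definition above) =====
theorem min_peaks_positions_py_spec : Claim_equal_min_peaks_positions_py := by
  intro intensities max_peaks _ hpre
  obtain ⟨hne, hchain, hlt⟩ := hpre
  unfold Spec_min_peaks_positions_py
  set N := (intensities.length : Int) with hN
  set m := max_peaks.length with hm
  set v := fun i => PySem.List.pyGetD intensities i 0 with hv
  set K := fun i => v i * (N + 1) - i with hK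
  set bs := max_peaks ++ [N] with hbs
  set L := (0 : Int) :: bs with hL
  have hN0 : 0 < N := by
    cases intensities with
    | nil => exact absurd rfl hne
    | cons a b => simp [hN]
  have hLlen : L.length = m + 2 := by simp [hL, hbs, hm]
  have hLpw : L.Pairwise (· < ·) := by
    have : List.Pairwise (· < ·) (((0 : Int) :: max_peaks) ++ [N]) := by
      rw [List.pairwise_append]
      refine ⟨hchain, by simp, ?_⟩
      intro a ha b hb
      simp at hb
      subst hb
      rcases List.mem_cons.mp ha with h | h
      · omega
      · exact hlt a h
    simpa [hL, hbs] using this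
  have hmono := List.pairwise_iff_getElem.mp hLpw
  have hL0 : L[0]'(by omega) = 0 := rfl
  have hLlast : L[m + 1]'(by omega) = N := by
    simp [hL, hbs, hm, List.getElem_append_right]
  -- segment-count correspondence
  have hSegCnt : ∀ i : Int, pvSegId max_peaks i
      = (max_peaks.countP (fun b => decide (b ≤ i)) : Int) := by
    intro i
    have := PySem.List.sum_map_ite_one_zero (fun b => decide (b ≤ i)) max_peaks
    unfold pvSegId
    simpa using this
  have hCntL : ∀ i : Int, 0 ≤ i → i < N →
      L.countP (fun b => decide (b ≤ i)) = max_peaks.countP (fun b => decide (b ≤ i)) + 1 := by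
    intro i h0 hiN
    simp [hL, hbs, List.countP_append, h0, not_le.mpr hiN]
  have hSegFwd : ∀ (i : Int) (k : Nat) (hk : k + 1 < L.length), 0 ≤ i → i < N →
      L[k]'(by omega) ≤ i → i < L[k + 1]'hk → pvSegId max_peaks i = (k : Int) := by
    intro i k hk h0 hiN hlo hhi
    have := pvCnt L hLpw k hk i hlo hhi
    rw [hCntL i h0 hiN] at this
    rw [hSegCnt i]
    omega
  have hSegBwd : ∀ (i : Int) (k : Nat) (hk : k + 1 < L.length), 0 ≤ i → i < N →
      pvSegId max_peaks i = (k : Int) →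
      L[k]'(by omega) ≤ i ∧ i < L[k + 1]'hk := by
    intro i k hk h0 hiN hcnt
    have hlast : ((0 : Int) :: bs).getLast (List.cons_ne_nil _ _) = N := by
      rw [List.getLast_eq_getElem]
      have hidx : ((0 : Int) :: bs).length - 1 = m + 1 := by
        simpa [hL] using hLlen
      simp only [hidx]
      exact hLlast
    obtain ⟨k', hk', h1, h2⟩ := pvExistsSeg bs 0 i h0 (by rw [hlast]; exact hiN)
    have hcnt' := hSegFwd i k' (by simpa [hL] using hk') h0 hiN (by simpa [hL] using h1)
      (by simpa [hL] using h2)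
    have hkk : k' = k := by
      rw [hcnt] at hcnt'
      exact_mod_cast hcnt'.symm
    subst hkk
    exact ⟨by simpa [hL] using h1, by simpa [hL] using h2⟩
  -- A's output as a map over consecutive boundary pairs
  have hA : min_peaks_positions_py intensities max_peaks
      = (L.zip bs).map
          (fun p => minimo_bl_py (PySem.List.slice intensities (some p.1) (some p.2)) + p.1) := by
    have h1 : min_peaks_positions_py intensities max_peaks
        = (bs.foldl
            (fun (st : List Int × Int) max_index =>
              (st.1 ++ [minimo_bl_py (PySem.List.slice intensities (some st.2) (some max_index)) + st.2],
               max_index)) ([], 0)).1 := by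
      unfold min_peaks_positions_py
      rw [hbs, List.foldl_append]
      rfl
    rw [h1, pvAList intensities bs [] 0]
    simp [hL]
  -- B's output via find? over the sorted order
  set order := PySem.List.sorted2 (PySem.List.pyRange 0 N 1) v (fun i => -i) with horder
  have hB : min_peaks_positions_py_alt intensities max_peaks
      = (PySem.List.pyRange 0 ((m : Int) + 1) 1).map
          (fun k => ((order.foldl (fun d i => d.setdefault (pvSegId max_peaks i) i)
              (PySem.Dict.empty : PySem.Dict Int Int)).getD k 0)) := rfl
  have horderPerm : order.Perm (PySem.List.pyRange 0 N 1) :=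
    PySem.List.sorted2_perm _ _ _ _
  have horderPw : order.Pairwise (fun a b => K a ≤ K b) := by
    rw [horder, hv, pvOrderEq intensities]
    exact PySem.List.sorted_pairwise _ _
  have hKle : ∀ r j : Int, 0 ≤ r → r < N → 0 ≤ j → j < N → K r ≤ K j → pvKle v r j := by
    intro r j hr0 hrN hj0 hjN hle
    have hiff := pvKeyLt (v j) (v r) j r N hj0 hjN hr0 hrN
    unfold pvKle
    rcases lt_trichotomy (v r) (v j) with h | h | h
    · exact Or.inl h
    · refine Or.inr ⟨h, ?_⟩
      by_contra hc
      have : K j < K r := hiff.mpr (Or.inr ⟨h.symm, by omega⟩)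
      simp only [hK] at this hle
      omega
    · exfalso
      have : K j < K r := hiff.mpr (Or.inl h)
      simp only [hK] at this hle
      omega
  rw [hA, hB]
  apply List.ext_getElem
  · simp [hL, hbs, hm, PySem.List.length_pyRange_one]
  intro k hk1 hk2
  have hkm : k < m + 1 := by
    simpa [hL, hbs, hm] using hk1
  have hkL : k + 1 < L.length := by omega
  -- name the segment bounds
  have hse : L[k]'(by omega) < L[k + 1]'hkL := hmono k (k + 1) (by omega) hkL (by omega)
  have hs0 : 0 ≤ L[k]'(by omega) := by
    rcases Nat.eq_zero_or_pos k with h | h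
    · subst h; rw [hL0]
    · have := hmono 0 k (by omega) (by omega) h
      rw [hL0] at this
      omega
  have heN : L[k + 1]'hkL ≤ N := by
    rcases Nat.lt_or_ge (k + 1) (m + 1) with h | h
    · have := hmono (k + 1) (m + 1) hkL (by omega) h
      rw [hLlast] at this
      omega
    · have hkeq : k + 1 = m + 1 := by omega
      simp only [hkeq, hLlast]
      omega
  -- the A entry is the argmin of the segment
  have hAk := pvASeg intensities (L[k]'(by omega)) (L[k + 1]'hkL) hs0 hse heN
  -- reduce the A entry
  have hAget : ((L.zip bs).map
      (fun p => minimo_bl_py (PySem.List.slice intensities (some p.1) (some p.2)) + p.1))[k]'hk1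
      = minimo_bl_py (PySem.List.slice intensities (some (L[k]'(by omega)))
          (some (L[k + 1]'hkL))) + L[k]'(by omega) := by
    have hzlen : k < (L.zip bs).length := by simpa using hk1
    rw [List.getElem_map, List.getElem_zip]
    have : bs[k]'(by simp [hL] at hkL; omega) = L[k + 1]'hkL := rfl
    rw [this]
  -- reduce the B entry to a find?
  set p : Int → Bool := fun i => pvSegId max_peaks i == (k : Int) with hp
  have hBget : ((PySem.List.pyRange 0 ((m : Int) + 1) 1).map
      (fun k => ((order.foldl (fun d i => d.setdefault (pvSegId max_peaks i) i)
          (PySem.Dict.empty : PySem.Dict Int Int)).getD k 0)))[k]'hk2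
      = (order.find? p).getD 0 := by
    rw [List.getElem_map, PySem.List.getElem_pyRange_one]
    rw [PySem.Dict.getD_eq_get?_getD, pvDictFold]
    simp [hp]
  -- the find? succeeds: the left end of the segment is a match
  have hmemOrder : ∀ j : Int, 0 ≤ j → j < N → j ∈ order := by
    intro j h0 hjN
    rw [horderPerm.mem_iff, PySem.List.mem_pyRange_one]
    exact ⟨h0, hjN⟩
  obtain ⟨r, hr⟩ : ∃ r, order.find? p = some r := by
    have hsmatch : p (L[k]'(by omega)) = true := by
      simp only [hp, beq_iff_eq]
      exact hSegFwd _ k hkL hs0 (by omega) le_rfl hse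
    have : (order.find? p).isSome := List.find?_isSome.mpr
      ⟨L[k]'(by omega), hmemOrder _ hs0 (by omega), hsmatch⟩
    exact Option.isSome_iff_exists.mp this
  obtain ⟨hpr, pre, suf, hsplit, hpre_nomatch⟩ := List.find?_eq_some_iff_append.mp hr
  have hrseg : pvSegId max_peaks r = (k : Int) := by simpa [hp] using hpr
  have hrmem : r ∈ order := by rw [hsplit]; simp
  have hr0N : 0 ≤ r ∧ r < N := by
    have := horderPerm.mem_iff.mp hrmem
    exact PySem.List.mem_pyRange_one.mp this
  have hrint := hSegBwd r k hkL hr0N.1 hr0N.2 hrseg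
  -- minimality of r over the segment
  have hBarg : pvArg intensities (L[k]'(by omega)) (L[k + 1]'hkL) r := by
    refine ⟨hrint.1, hrint.2, ?_⟩
    intro j hj1 hj2
    have hj0 : 0 ≤ j := le_trans hs0 hj1
    have hjN : j < N := lt_of_lt_of_le hj2 heN
    have hjseg : pvSegId max_peaks j = (k : Int) := hSegFwd j k hkL hj0 hjN hj1 hj2
    have hjmem : j ∈ order := hmemOrder j hj0 hjN
    rw [hsplit] at hjmem
    rcases List.mem_append.mp hjmem with hjpre | hjtail
    · exfalso
      have := hpre_nomatch j hjpre
      simp [hp, hjseg] at this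
    · rcases List.mem_cons.mp hjtail with hjr | hjsuf
      · subst hjr
        exact Or.inr ⟨rfl, le_rfl⟩
      · have hpw := horderPw
        rw [hsplit] at hpw
        have := (List.pairwise_cons.mp (List.pairwise_append.mp hpw).2.1).1 j hjsuf
        exact hKle r j hr0N.1 hr0N.2 hj0 hjN this
  rw [hAget, hBget, hr]
  simpa using pvArg_unique intensities _ _ _ _ hAk hBarg
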